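-- pv_equiv track=rewrite | github.com/pmj0324/GENESIS | scripts/migrate_metrics_to_best_only.py | _select_best_record
-- ===== SOURCE A (Python) =====
-- from typing import Any
--
-- def _safe_int(value: Any) -> int | None:
--     try:
--         return int(value)
--     except Exception:
--         return None
--
-- def _select_best_record(records: list[dict], best_epoch: int) -> dict:
--     # Exact match
--     for r in records:
--         if (_safe_int(r.get("epoch")) or -1) == best_epoch:
--             return dict(r)
--
--     # Closest epoch fallback
--     return dict(
--         min(
--             records,
--             key=lambda r: abs((_safe_int(r.get("epoch")) or 0) - best_epoch),
--         )
--     )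
-- ===== SOURCE B (Python) =====
-- def _safe_int(value):
--     try:
--         return int(value)
--     except Exception:
--         return None
--
--
-- def _select_best_record(records: list, best_epoch: int) -> dict:
--     # Stage 1: build a boolean match-list and jump to the first exact match by index.
--     matched = [(_safe_int(r.get("epoch")) or -1) == best_epoch for r in records]
--     if True in matched:
--         return dict(records[matched.index(True)])
--     # Stage 2: stable sort by absolute distance; the head is the first-minimal record
--     # (stability reproduces min()'s first-wins tie-break).
--     by_dist = sorted(records, key=lambda r: abs((_safe_int(r.get("epoch")) or 0) - best_epoch))
--     return dict(by_dist[0])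
-- ===== Notes on version B (the rewrite author's own statement) =====
-- stated objective: alternative
-- what changed: A scans for an exact match and then calls min() with a distance key; B instead builds a boolean match-list and indexes into records with list.index(True), and for the fallback stably sorts the records by absolute distance and takes the head (stability reproduces min()'s first-wins tie-break).
import Mathlib
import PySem

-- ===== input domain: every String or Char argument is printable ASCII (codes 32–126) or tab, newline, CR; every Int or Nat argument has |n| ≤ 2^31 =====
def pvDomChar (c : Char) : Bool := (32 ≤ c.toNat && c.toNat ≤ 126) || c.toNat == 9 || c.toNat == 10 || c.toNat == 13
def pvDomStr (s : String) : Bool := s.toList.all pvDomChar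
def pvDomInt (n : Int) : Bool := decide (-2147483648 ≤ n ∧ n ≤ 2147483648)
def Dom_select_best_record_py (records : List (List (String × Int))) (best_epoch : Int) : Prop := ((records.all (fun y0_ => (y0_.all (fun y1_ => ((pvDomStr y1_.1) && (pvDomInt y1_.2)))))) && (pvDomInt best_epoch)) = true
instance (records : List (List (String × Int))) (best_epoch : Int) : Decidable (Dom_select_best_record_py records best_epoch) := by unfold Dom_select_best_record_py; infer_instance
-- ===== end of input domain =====

-- B replaces A's two passes (exact-match scan, then min()) with a boolean match-list + list.index for the exact match and a stable sort by distance + head for the fallback (alternative decomposition; return value only — both Pythons raise on empty records, excluded by Pre_).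


-- ===== PORT A =====
-- `_safe_int(r.get("epoch")) or -1`: values are Int, so _safe_int is the identity on a present
-- value and None when the key is absent; `or` replaces None and 0 (falsy) by the right operand.
def pvEpochOrNeg1 (r : List (String × Int)) : Int :=
  match (PySem.Dict.ofList r).get? "epoch" with
  | none => -1
  | some v => if v = 0 then -1 else v

-- `_safe_int(r.get("epoch")) or 0`
def pvEpochOr0 (r : List (String × Int)) : Int :=
  match (PySem.Dict.ofList r).get? "epoch" with
  | none => 0
  | some v => v

-- the first `for r in records: if …: return dict(r)` loop
def pvExactLoop (records : List (List (String × Int))) (best_epoch : Int) : Option (List (String × Int)) :=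
  match records with
  | [] => none
  | r :: rest =>
    if pvEpochOrNeg1 r = best_epoch then some (PySem.Dict.ofList r).items
    else pvExactLoop rest best_epoch

def select_best_record_py (records : List (List (String × Int))) (best_epoch : Int) : List (String × Int) :=
  match pvExactLoop records best_epoch with
  | some out => out
  | none =>
    match PySem.List.min? records (fun r => |pvEpochOr0 r - best_epoch|) with
    | some m => (PySem.Dict.ofList m).items
    | none => []   -- Python raises ValueError here (empty records); excluded by Pre_

-- ===== PORT B =====
-- matched = [... == best_epoch for r in records]; records[matched.index(True)];
-- fallback: sorted(records, key=distance)[0] (stable sort, head).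
def select_best_record_py_alt (records : List (List (String × Int))) (best_epoch : Int) : List (String × Int) :=
  match PySem.List.index? (records.map (fun r => decide (pvEpochOrNeg1 r = best_epoch))) true with
  | some i => (PySem.Dict.ofList (records.getD i [])).items
  | none =>
    match PySem.List.sorted records (fun r => |pvEpochOr0 r - best_epoch|) with
    | m :: _ => (PySem.Dict.ofList m).items
    | [] => []   -- Python B raises IndexError here (empty records); excluded by Pre_

-- ===== PRECONDITION & SPEC =====
-- Pre_ excludes only the empty list, on which both Pythons raise (A ValueError, B IndexError).
def Pre_select_best_record_py (records : List (List (String × Int))) (best_epoch : Int) : Prop :=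
  records ≠ []
instance (records : List (List (String × Int))) (best_epoch : Int) : Decidable (Pre_select_best_record_py records best_epoch) := by unfold Pre_select_best_record_py; infer_instance
def pvWitness_select_best_record_py : (List (List (String × Int))) × Int := ([[("epoch", 1)]], 1)
def Spec_select_best_record_py (records : List (List (String × Int))) (best_epoch : Int) (out : List (String × Int)) : Prop := out = select_best_record_py_alt records best_epoch
instance (records : List (List (String × Int))) (best_epoch : Int) (out : List (String × Int)) : Decidable (Spec_select_best_record_py records best_epoch out) := by unfold Spec_select_best_record_py; infer_instance

-- ===== CLAIM (what is proved, stated in full; the proofs are below) =====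
def Claim_equal_select_best_record_py : Prop := ∀ (records : List (List (String × Int))) (best_epoch : Int), Dom_select_best_record_py records best_epoch → Pre_select_best_record_py records best_epoch → Spec_select_best_record_py records best_epoch (select_best_record_py records best_epoch)

-- ===== LEMMAS AND PROOFS =====

-- A's early-return scan equals B's match-list + index lookup.
lemma exactLoop_eq_index (records : List (List (String × Int))) (be : Int) :
    pvExactLoop records be =
      (PySem.List.index? (records.map (fun r => decide (pvEpochOrNeg1 r = be))) true).map
        (fun i => (PySem.Dict.ofList (records.getD i [])).items) := by
  induction records with
  | nil => simp [pvExactLoop, PySem.List.index?]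
  | cons r rest ih =>
    by_cases h : pvEpochOrNeg1 r = be
    · simp [pvExactLoop, PySem.List.index?, List.idxOf?_cons, h]
    · simp [pvExactLoop, h, PySem.List.index?, List.idxOf?_cons, ih,
        Option.map_map, Function.comp_def]

-- head of insertBy changes only by comparison with the old head
lemma head?_insertBy {α κ : Type} [LinearOrder κ] (key : α → κ) (x : α) (ys : List α) :
    (PySem.List.insertBy (fun a b => decide (key a < key b)) x ys).head? =
      match ys.head? with
      | none => some x
      | some y => if key x < key y then some x else some y := by
  cases ys with
  | nil => rfl
  | cons y t =>
    simp only [PySem.List.insertBy, List.head?_cons]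
    by_cases h : key x < key y <;> simp [h]

-- head of the insertion-sort fold computes exactly min?'s running fold
lemma head?_foldl_insertBy {α κ : Type} [LinearOrder κ] (key : α → κ)
    (l acc : List α) :
    (l.foldl (fun a x => PySem.List.insertBy (fun a b => decide (key a < key b)) x a) acc).head? =
      l.foldl (fun a x =>
        match a with
        | none => some x
        | some m => if key x < key m then some x else some m) acc.head? := by
  induction l generalizing acc with
  | nil => rfl
  | cons x t ih =>
    rw [List.foldl_cons, List.foldl_cons, ih, head?_insertBy]

-- the head of a stable sort is min?'s first-minimal element
lemma head?_sorted_eq_min? {α κ : Type} [LinearOrder κ] (xs : List α) (key : α → κ) :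
    (PySem.List.sorted xs key).head? = PySem.List.min? xs key := by
  simpa [PySem.List.sorted, PySem.List.min?] using head?_foldl_insertBy key xs []

-- ===== VERDICT (by name: the statement is the Claim_ definition above) =====
theorem select_best_record_py_spec : Claim_equal_select_best_record_py := by
  intro records be _ _
  unfold Spec_select_best_record_py select_best_record_py select_best_record_py_alt
  rw [exactLoop_eq_index records be]
  cases hix : PySem.List.index? (records.map (fun r => decide (pvEpochOrNeg1 r = be))) true with
  | some i => rfl
  | none =>
    simp only [Option.map_none]
    have h := head?_sorted_eq_min? records (fun r => |pvEpochOr0 r - be|)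
    cases hs : PySem.List.sorted records (fun r => |pvEpochOr0 r - be|) with
    | nil => rw [hs] at h; simp only [List.head?_nil] at h; rw [← h]
    | cons m t => rw [hs] at h; simp only [List.head?_cons] at h; rw [← h]
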